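-- pv_equiv track=rewrite | github.com/0x251/Betanet-Lib | peer/__init__.py | negotiate_transport
-- ===== SOURCE A (Python) =====
-- from typing import List, Optional
--
-- def negotiate_transport(local: List[str], remote: List[str]) -> Optional[str]:
-- 	order = ["/betanet/htxquic/1.1.0", "/betanet/htx/1.1.0"]
-- 	inter = [t for t in order if t in local and t in remote]
-- 	if inter:
-- 		return inter[0]
-- 	for t in local:
-- 		if t in remote:
-- 			return t
-- 	return None
-- ===== SOURCE B (Python) =====
-- from typing import List, Optional
--
-- def negotiate_transport(local: List[str], remote: List[str]) -> Optional[str]: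
-- 	rank = {"/betanet/htxquic/1.1.0": 0, "/betanet/htx/1.1.0": 1}
-- 	rset = set(remote)
-- 	best = None  # (rank, transport) with the smallest rank seen; first occurrence wins ties
-- 	for t in local:
-- 		if t in rset:
-- 			r = rank.get(t, 2)
-- 			if best is None or r < best[0]:
-- 				best = (r, t)
-- 	return None if best is None else best[1]
-- ===== Notes on version B (the rewrite author's own statement) =====
-- stated objective: alternative
-- what changed: B makes a single pass over local with a min-by-rank accumulator (rank 0/1 for the two preferred transports via a dict, 2 otherwise, strict comparison so the first common element wins ties, membership via a set of remote), replacing A's two staged scans (priority-list filter with double membership, then a fallback scan over local).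
import Mathlib
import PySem

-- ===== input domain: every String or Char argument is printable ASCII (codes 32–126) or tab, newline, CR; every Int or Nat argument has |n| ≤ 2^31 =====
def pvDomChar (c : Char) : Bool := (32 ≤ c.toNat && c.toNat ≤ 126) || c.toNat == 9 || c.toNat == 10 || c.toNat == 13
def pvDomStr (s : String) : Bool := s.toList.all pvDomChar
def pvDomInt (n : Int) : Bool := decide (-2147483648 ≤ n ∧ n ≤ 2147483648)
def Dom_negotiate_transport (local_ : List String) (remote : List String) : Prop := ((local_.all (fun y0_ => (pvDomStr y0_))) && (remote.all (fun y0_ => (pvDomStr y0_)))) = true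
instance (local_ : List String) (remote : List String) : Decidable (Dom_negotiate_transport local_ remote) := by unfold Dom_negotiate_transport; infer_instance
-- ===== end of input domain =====

-- One honest line: B replaces A's two staged scans (priority-list filter, then fallback scan
-- over local) by a single pass over local keeping the minimum-rank common transport (alternative).

-- ===== PORT A =====
-- A's trailing loop: "for t in local: if t in remote: return t; return None"
def pvALoop (l : List String) (remote : List String) : Option String :=
  match l with
  | [] => none
  | t :: rest => if remote.contains t then some t else pvALoop rest remote

def negotiate_transport (local_ : List String) (remote : List String) : Option String :=
  let order := ["/betanet/htxquic/1.1.0", "/betanet/htx/1.1.0"]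
  let inter := order.filter (fun t => local_.contains t && remote.contains t)
  match inter with
  | t :: _ => some t
  | [] => pvALoop local_ remote

-- ===== PORT B =====
-- rank = {"/betanet/htxquic/1.1.0": 0, "/betanet/htx/1.1.0": 1}
def pvRank : PySem.Dict String Int :=
  PySem.Dict.ofList [("/betanet/htxquic/1.1.0", 0), ("/betanet/htx/1.1.0", 1)]

-- loop body: "if t in rset: r = rank.get(t, 2); if best is None or r < best[0]: best = (r, t)"
def pvBStep (rset : PySem.Set String) (best : Option (Int × String)) (t : String) : Option (Int × String) :=
  if PySem.Set.contains rset t then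
    let r := PySem.Dict.getD pvRank t 2
    match best with
    | none => some (r, t)
    | some b => if r < b.1 then some (r, t) else best
  else best

def negotiate_transport_alt (local_ : List String) (remote : List String) : Option String :=
  let rset : PySem.Set String := PySem.Set.ofList remote
  match local_.foldl (pvBStep rset) none with
  | none => none
  | some b => some b.2

-- ===== PRECONDITION & SPEC =====
def Spec_negotiate_transport (local_ : List String) (remote : List String) (out : Option String) : Prop := out = negotiate_transport_alt local_ remote
instance (local_ : List String) (remote : List String) (out : Option String) : Decidable (Spec_negotiate_transport local_ remote out) := by unfold Spec_negotiate_transport; infer_instance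

-- ===== CLAIM (what is proved, stated in full; the proofs are below) =====
def Claim_equal_negotiate_transport : Prop := ∀ (local_ : List String) (remote : List String), Dom_negotiate_transport local_ remote → Spec_negotiate_transport local_ remote (negotiate_transport local_ remote)

-- ===== LEMMAS AND PROOFS =====

theorem pvRank_getD (t : String) :
    PySem.Dict.getD pvRank t 2 =
      if t = "/betanet/htxquic/1.1.0" then 0
      else if t = "/betanet/htx/1.1.0" then 1 else 2 := by
  have h : pvRank = PySem.Dict.mk [("/betanet/htxquic/1.1.0", 0), ("/betanet/htx/1.1.0", 1)] := by decide
  rw [h, PySem.Dict.getD, PySem.Dict.get?_mk_cons, PySem.Dict.get?_mk_cons]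
  simp only [beq_iff_eq]
  by_cases h1 : t = "/betanet/htxquic/1.1.0"
  · subst h1; rw [if_pos rfl, if_pos rfl]; rfl
  · rw [if_neg (fun e => h1 e.symm), if_neg h1]
    by_cases h2 : t = "/betanet/htx/1.1.0"
    · subst h2; rw [if_pos rfl, if_pos rfl]; rfl
    · rw [if_neg (fun e => h2 e.symm), if_neg h2]; rfl

theorem pvStep_q (remote : List String) (t : String) :
    pvBStep remote (some (0, "/betanet/htxquic/1.1.0")) t = some (0, "/betanet/htxquic/1.1.0") := by
  simp only [pvBStep, pvRank_getD, PySem.Set.contains, List.contains_eq_mem, decide_eq_true_eq]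
  split_ifs <;> first | rfl | omega

theorem pvStep_h (remote : List String) (t : String) :
    pvBStep remote (some (1, "/betanet/htx/1.1.0")) t =
      if t ∈ remote ∧ t = "/betanet/htxquic/1.1.0" then some (0, "/betanet/htxquic/1.1.0")
      else some (1, "/betanet/htx/1.1.0") := by
  simp only [pvBStep, pvRank_getD, PySem.Set.contains, List.contains_eq_mem, decide_eq_true_eq]
  split_ifs with h1 h2 h3 h4 <;> first | rfl | omega | (subst h2; rfl) | tauto

theorem pvStep_2 (remote : List String) (x t : String) :
    pvBStep remote (some (2, x)) t =
      if t ∈ remote ∧ t = "/betanet/htxquic/1.1.0" then some (0, "/betanet/htxquic/1.1.0")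
      else if t ∈ remote ∧ t = "/betanet/htx/1.1.0" then some (1, "/betanet/htx/1.1.0")
      else some (2, x) := by
  simp only [pvBStep, pvRank_getD, PySem.Set.contains, List.contains_eq_mem, decide_eq_true_eq]
  split_ifs <;> first | rfl | omega | tauto

theorem pvStep_none (remote : List String) (t : String) :
    pvBStep remote none t =
      if t ∈ remote then some (PySem.Dict.getD pvRank t 2, t) else none := by
  simp only [pvBStep, PySem.Set.contains, List.contains_eq_mem, decide_eq_true_eq]

theorem pvFold_q (l remote : List String) :
    l.foldl (pvBStep remote) (some (0, "/betanet/htxquic/1.1.0")) = some (0, "/betanet/htxquic/1.1.0") := by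
  induction l with
  | nil => rfl
  | cons t rest ih => rw [List.foldl_cons, pvStep_q, ih]

theorem pvFold_h (l remote : List String) :
    l.foldl (pvBStep remote) (some (1, "/betanet/htx/1.1.0")) =
      (if "/betanet/htxquic/1.1.0" ∈ l ∧ "/betanet/htxquic/1.1.0" ∈ remote
       then some (0, "/betanet/htxquic/1.1.0") else some (1, "/betanet/htx/1.1.0")) := by
  induction l with
  | nil => simp
  | cons t rest ih =>
    rw [List.foldl_cons, pvStep_h]
    by_cases hq : t ∈ remote ∧ t = "/betanet/htxquic/1.1.0"
    · rw [if_pos hq, pvFold_q, if_pos ⟨hq.2 ▸ List.mem_cons_self .., hq.2 ▸ hq.1⟩]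
    · rw [if_neg hq, ih]
      by_cases hm : "/betanet/htxquic/1.1.0" ∈ rest ∧ "/betanet/htxquic/1.1.0" ∈ remote
      · rw [if_pos hm, if_pos ⟨List.mem_cons_of_mem _ hm.1, hm.2⟩]
      · rw [if_neg hm, if_neg]
        rintro ⟨hmem, hr⟩
        rcases List.mem_cons.1 hmem with h | h
        · exact hq ⟨h ▸ hr, h.symm⟩
        · exact hm ⟨h, hr⟩

theorem pvFold_2 (l remote : List String) (x : String) :
    l.foldl (pvBStep remote) (some (2, x)) =
      (if "/betanet/htxquic/1.1.0" ∈ l ∧ "/betanet/htxquic/1.1.0" ∈ remote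
       then some (0, "/betanet/htxquic/1.1.0")
       else if "/betanet/htx/1.1.0" ∈ l ∧ "/betanet/htx/1.1.0" ∈ remote
       then some (1, "/betanet/htx/1.1.0") else some (2, x)) := by
  induction l with
  | nil => simp
  | cons t rest ih =>
    rw [List.foldl_cons, pvStep_2]
    by_cases hq : t ∈ remote ∧ t = "/betanet/htxquic/1.1.0"
    · rw [if_pos hq, pvFold_q, if_pos ⟨hq.2 ▸ List.mem_cons_self .., hq.2 ▸ hq.1⟩]
    · rw [if_neg hq]
      by_cases hh : t ∈ remote ∧ t = "/betanet/htx/1.1.0"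
      · rw [if_pos hh, pvFold_h]
        by_cases hm : "/betanet/htxquic/1.1.0" ∈ rest ∧ "/betanet/htxquic/1.1.0" ∈ remote
        · rw [if_pos hm, if_pos ⟨List.mem_cons_of_mem _ hm.1, hm.2⟩]
        · have hq' : ¬("/betanet/htxquic/1.1.0" ∈ t :: rest ∧ "/betanet/htxquic/1.1.0" ∈ remote) := by
            rintro ⟨hmem, hr⟩
            rcases List.mem_cons.1 hmem with h | h
            · exact hq ⟨h ▸ hr, h.symm⟩
            · exact hm ⟨h, hr⟩
          rw [if_neg hm, if_neg hq', if_pos ⟨hh.2 ▸ List.mem_cons_self .., hh.2 ▸ hh.1⟩]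
      · rw [if_neg hh, ih]
        have e1 : ("/betanet/htxquic/1.1.0" ∈ t :: rest ∧ "/betanet/htxquic/1.1.0" ∈ remote) ↔
            ("/betanet/htxquic/1.1.0" ∈ rest ∧ "/betanet/htxquic/1.1.0" ∈ remote) := by
          constructor
          · rintro ⟨hmem, hr⟩
            rcases List.mem_cons.1 hmem with h | h
            · exact absurd ⟨h ▸ hr, h.symm⟩ hq
            · exact ⟨h, hr⟩
          · exact fun ⟨hm, hr⟩ => ⟨List.mem_cons_of_mem _ hm, hr⟩
        have e2 : ("/betanet/htx/1.1.0" ∈ t :: rest ∧ "/betanet/htx/1.1.0" ∈ remote) ↔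
            ("/betanet/htx/1.1.0" ∈ rest ∧ "/betanet/htx/1.1.0" ∈ remote) := by
          constructor
          · rintro ⟨hmem, hr⟩
            rcases List.mem_cons.1 hmem with h | h
            · exact absurd ⟨h ▸ hr, h.symm⟩ hh
            · exact ⟨h, hr⟩
          · exact fun ⟨hm, hr⟩ => ⟨List.mem_cons_of_mem _ hm, hr⟩
        rw [if_congr e1 rfl rfl, if_congr e2 rfl rfl]

theorem pvFold_none (l remote : List String) :
    l.foldl (pvBStep remote) none =
      (if "/betanet/htxquic/1.1.0" ∈ l ∧ "/betanet/htxquic/1.1.0" ∈ remote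
       then some (0, "/betanet/htxquic/1.1.0")
       else if "/betanet/htx/1.1.0" ∈ l ∧ "/betanet/htx/1.1.0" ∈ remote
       then some (1, "/betanet/htx/1.1.0")
       else ((l.filter (fun t => remote.contains t)).head?).map (fun t => (2, t))) := by
  induction l with
  | nil => simp
  | cons t rest ih =>
    rw [List.foldl_cons, pvStep_none]
    by_cases hc : t ∈ remote
    · rw [if_pos hc, pvRank_getD]
      by_cases h1 : t = "/betanet/htxquic/1.1.0"
      · subst h1; rw [if_pos rfl, pvFold_q, if_pos ⟨List.mem_cons_self .., hc⟩]
      · rw [if_neg h1]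
        by_cases h2 : t = "/betanet/htx/1.1.0"
        · subst h2; rw [if_pos rfl, pvFold_h]
          by_cases hm : "/betanet/htxquic/1.1.0" ∈ rest ∧ "/betanet/htxquic/1.1.0" ∈ remote
          · rw [if_pos hm, if_pos ⟨List.mem_cons_of_mem _ hm.1, hm.2⟩]
          · have hq' : ¬("/betanet/htxquic/1.1.0" ∈ "/betanet/htx/1.1.0" :: rest ∧ "/betanet/htxquic/1.1.0" ∈ remote) := by
              rintro ⟨hmem, hr⟩
              rcases List.mem_cons.1 hmem with h | h
              · exact h1 h.symm
              · exact hm ⟨h, hr⟩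
            rw [if_neg hm, if_neg hq', if_pos ⟨List.mem_cons_self .., hc⟩]
        · rw [if_neg h2, pvFold_2]
          have hq' : ¬("/betanet/htxquic/1.1.0" ∈ t :: rest ∧ "/betanet/htxquic/1.1.0" ∈ remote) ↔
              ¬("/betanet/htxquic/1.1.0" ∈ rest ∧ "/betanet/htxquic/1.1.0" ∈ remote) := by
            constructor
            · intro h hm; exact h ⟨List.mem_cons_of_mem _ hm.1, hm.2⟩
            · intro h; rintro ⟨hmem, hr⟩
              rcases List.mem_cons.1 hmem with hh | hh
              · exact h1 hh.symm
              · exact h ⟨hh, hr⟩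
          have hh' : ("/betanet/htx/1.1.0" ∈ t :: rest ∧ "/betanet/htx/1.1.0" ∈ remote) ↔
              ("/betanet/htx/1.1.0" ∈ rest ∧ "/betanet/htx/1.1.0" ∈ remote) := by
            constructor
            · rintro ⟨hmem, hr⟩
              rcases List.mem_cons.1 hmem with hh | hh
              · exact absurd hh.symm h2
              · exact ⟨hh, hr⟩
            · exact fun ⟨hm, hr⟩ => ⟨List.mem_cons_of_mem _ hm, hr⟩
          have hq'' : ("/betanet/htxquic/1.1.0" ∈ t :: rest ∧ "/betanet/htxquic/1.1.0" ∈ remote) ↔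
              ("/betanet/htxquic/1.1.0" ∈ rest ∧ "/betanet/htxquic/1.1.0" ∈ remote) := by
            constructor
            · rintro ⟨hmem, hr⟩
              rcases List.mem_cons.1 hmem with hh | hh
              · exact absurd hh.symm h1
              · exact ⟨hh, hr⟩
            · exact fun ⟨hm, hr⟩ => ⟨List.mem_cons_of_mem _ hm, hr⟩
          rw [if_congr hq'' rfl rfl, if_congr hh' rfl rfl]
          by_cases hmq : "/betanet/htxquic/1.1.0" ∈ rest ∧ "/betanet/htxquic/1.1.0" ∈ remote
          · rw [if_pos hmq, if_pos hmq]
          · rw [if_neg hmq, if_neg hmq]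
            by_cases hmh : "/betanet/htx/1.1.0" ∈ rest ∧ "/betanet/htx/1.1.0" ∈ remote
            · rw [if_pos hmh, if_pos hmh]
            · rw [if_neg hmh, if_neg hmh]
              have : (t :: rest).filter (fun s => remote.contains s) =
                  t :: rest.filter (fun s => remote.contains s) := by
                rw [List.filter_cons, if_pos (by simpa using hc)]
              rw [this]; rfl
    · rw [if_neg hc, ih]
      have e1 : ("/betanet/htxquic/1.1.0" ∈ t :: rest ∧ "/betanet/htxquic/1.1.0" ∈ remote) ↔
          ("/betanet/htxquic/1.1.0" ∈ rest ∧ "/betanet/htxquic/1.1.0" ∈ remote) := by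
        constructor
        · rintro ⟨hmem, hr⟩
          rcases List.mem_cons.1 hmem with hh | hh
          · exact absurd (hh ▸ hr) hc
          · exact ⟨hh, hr⟩
        · exact fun ⟨hm, hr⟩ => ⟨List.mem_cons_of_mem _ hm, hr⟩
      have e2 : ("/betanet/htx/1.1.0" ∈ t :: rest ∧ "/betanet/htx/1.1.0" ∈ remote) ↔
          ("/betanet/htx/1.1.0" ∈ rest ∧ "/betanet/htx/1.1.0" ∈ remote) := by
        constructor
        · rintro ⟨hmem, hr⟩
          rcases List.mem_cons.1 hmem with hh | hh
          · exact absurd (hh ▸ hr) hc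
          · exact ⟨hh, hr⟩
        · exact fun ⟨hm, hr⟩ => ⟨List.mem_cons_of_mem _ hm, hr⟩
      have hf : (t :: rest).filter (fun s => remote.contains s) =
          rest.filter (fun s => remote.contains s) := by
        rw [List.filter_cons, if_neg (by simpa using hc)]
      rw [if_congr e1 rfl rfl, if_congr e2 rfl rfl, hf]


theorem pvALoop_eq_head_filter (l remote : List String) :
    pvALoop l remote = (l.filter (fun t => remote.contains t)).head? := by
  induction l with
  | nil => rfl
  | cons t rest ih =>
    by_cases h : t ∈ remote <;> simp [pvALoop, h, ih]

-- ===== VERDICT (by name: the statement is the Claim_ definition above) =====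
theorem negotiate_transport_spec : Claim_equal_negotiate_transport := by
  intro local_ remote _
  simp only [Spec_negotiate_transport, negotiate_transport, negotiate_transport_alt]
  rw [pvFold_none]
  have hsf : List.filter (fun t => List.contains (PySem.Set.ofList remote) t) local_ =
      List.filter (fun t => remote.contains t) local_ := by
    apply List.filter_congr; intro t _
    simp [List.contains_eq_mem, PySem.Set.mem_ofList]
  simp only [PySem.Set.mem_ofList, hsf, List.filter_cons, List.filter_nil]
  by_cases ha : "/betanet/htxquic/1.1.0" ∈ local_ ∧ "/betanet/htxquic/1.1.0" ∈ remote
  · simp [ha]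
  · by_cases hb : "/betanet/htx/1.1.0" ∈ local_ ∧ "/betanet/htx/1.1.0" ∈ remote
    · simp [ha, hb]
    · simp only [ha, hb, if_false]
      rw [pvALoop_eq_head_filter]
      have hqf : (local_.contains "/betanet/htxquic/1.1.0" && remote.contains "/betanet/htxquic/1.1.0") = false := by
        simp only [Bool.and_eq_false_iff, List.contains_eq_mem, decide_eq_false_iff_not]
        tauto
      have hhf : (local_.contains "/betanet/htx/1.1.0" && remote.contains "/betanet/htx/1.1.0") = false := by
        simp only [Bool.and_eq_false_iff, List.contains_eq_mem, decide_eq_false_iff_not]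
        tauto
      simp only [hqf, hhf, Bool.false_eq_true, if_false]
      cases hf : (local_.filter (fun t => remote.contains t)).head? <;> rfl
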